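-- pv_equiv track=rewrite | github.com/vovademar/plsBlockchain | blockchain/helpers/shuffleshifter.py | unshuffle_shifter
-- ===== SOURCE A (Python) =====
-- def unshift(shifted_value, v, n):
--     unshifted_value = (shifted_value - v + n) % n
--     return unshifted_value
--
-- def unshuffle(n, k, size):
--     mask = (1 << size) - 1
--     k = k % size
--     left = (n << (size - k)) & mask
--     right = (n >> k) & mask
--     return (left | right) & mask
--
-- def unshuffle_shifter(user_id, block_number, rounds):
--     size = 8
--     n = 2 ** size
--     v = block_number
--     F = 0x5EED
--     for _ in range(rounds):
--         v = (F * v + 1) % n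
--     for _ in range(rounds):
--         v = (v - 1) * pow(F, -1, n) % n
--         user_id = unshift(user_id, v, n)
--         user_id = unshuffle(user_id, 1, size)
--     return user_id
-- ===== SOURCE B (Python) =====
-- def unshuffle_shifter(user_id, block_number, rounds):
--     # One forward pass records the v-sequence; the reverse replay then needs no
--     # modular inverse at all (A recomputes pow(F, -1, 256) every round).
--     n = 256
--     F = 0x5EED
--     vs = []
--     v = block_number % n
--     for _ in range(max(rounds, 0)):
--         vs.append(v)
--         v = (F * v + 1) % n
--     for v in reversed(vs):
--         user_id = (user_id - v) % n
--         user_id = (user_id >> 1) | ((user_id & 1) << 7)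
--     return user_id
-- ===== Notes on version B (the rewrite author's own statement) =====
-- stated objective: faster
-- what changed: B makes one forward pass recording the v-sequence and then replays it in reverse with a fold, eliminating A's second loop that reconstructs each v via a per-round modular inverse pow(F,-1,n).
import Mathlib
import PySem

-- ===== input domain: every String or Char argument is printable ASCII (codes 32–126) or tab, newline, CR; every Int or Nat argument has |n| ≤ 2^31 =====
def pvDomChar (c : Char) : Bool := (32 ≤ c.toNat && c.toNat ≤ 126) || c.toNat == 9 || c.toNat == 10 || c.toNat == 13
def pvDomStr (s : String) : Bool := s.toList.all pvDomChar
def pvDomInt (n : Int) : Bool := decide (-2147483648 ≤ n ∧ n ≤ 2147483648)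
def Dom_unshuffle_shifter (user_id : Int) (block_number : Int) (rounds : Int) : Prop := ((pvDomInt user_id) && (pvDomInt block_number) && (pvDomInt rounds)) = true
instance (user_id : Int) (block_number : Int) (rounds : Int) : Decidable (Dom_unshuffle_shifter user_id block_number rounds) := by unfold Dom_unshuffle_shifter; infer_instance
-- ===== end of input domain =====

-- B records the forward v-sequence once and replays it in reverse, so the per-round
-- modular inverse pow(F, -1, n) of A disappears (objective: faster, constant-factor).

-- ===== PORT A =====
def unshift (shifted_value : Int) (v : Int) (n : Int) : Int :=
  PySem.Int.mod (shifted_value - v + n) n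

def unshuffle (n : Int) (k : Int) (size : Int) : Int :=
  let mask : Int := (1 <<< size.toNat) - 1
  let k : Int := PySem.Int.mod k size
  let left : Int := PySem.Int.band (n <<< (size - k).toNat) mask
  let right : Int := PySem.Int.band (n >>> k.toNat) mask
  PySem.Int.band (PySem.Int.bor left right) mask

-- pow(a, -1, n): Python's modular inverse, the unique x in range(n) with a*x % n == 1;
-- exact for A's only call (a = 0x5EED odd, n = 256, so gcd(a, n) = 1 and the inverse exists)
def powNegOneMod (a : Int) (n : Int) : Int :=
  ((PySem.List.pyRange 0 n 1).find? (fun x => PySem.Int.mod (a * x) n == 1)).getD 0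

def unshuffle_shifter (user_id : Int) (block_number : Int) (rounds : Int) : Int :=
  let size : Int := 8
  let n : Int := 2 ^ size.toNat   -- 2 ** size, size = 8 ≥ 0
  let F : Int := 0x5EED
  let v : Int := (PySem.List.pyRange 0 rounds 1).foldl
      (fun v _ => PySem.Int.mod (F * v + 1) n) block_number
  let st : Int × Int := (PySem.List.pyRange 0 rounds 1).foldl
      (fun st _ =>
        let v := PySem.Int.mod ((st.2 - 1) * powNegOneMod F n) n
        (unshuffle (unshift st.1 v n) 1 size, v)) (user_id, v)
  st.1

-- ===== PORT B =====
def unshuffle_shifter_alt (user_id : Int) (block_number : Int) (rounds : Int) : Int :=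
  let n : Int := 256
  let F : Int := 0x5EED
  let acc : List Int × Int := (PySem.List.pyRange 0 (max rounds 0) 1).foldl
      (fun p _ => (p.1 ++ [p.2], PySem.Int.mod (F * p.2 + 1) n))
      ([], PySem.Int.mod block_number n)
  acc.1.reverse.foldl
      (fun u v =>
        let u := PySem.Int.mod (u - v) n
        PySem.Int.bor (u >>> 1) (PySem.Int.band u 1 <<< 7)) user_id

-- ===== PRECONDITION & SPEC =====
def Spec_unshuffle_shifter (user_id : Int) (block_number : Int) (rounds : Int) (out : Int) : Prop := out = unshuffle_shifter_alt user_id block_number rounds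
instance (user_id : Int) (block_number : Int) (rounds : Int) (out : Int) : Decidable (Spec_unshuffle_shifter user_id block_number rounds out) := by unfold Spec_unshuffle_shifter; infer_instance

-- ===== CLAIM (what is proved, stated in full; the proofs are below) =====
def Claim_equal_unshuffle_shifter : Prop := ∀ (user_id : Int) (block_number : Int) (rounds : Int), Dom_unshuffle_shifter user_id block_number rounds → Spec_unshuffle_shifter user_id block_number rounds (unshuffle_shifter user_id block_number rounds)

-- ===== LEMMAS AND PROOFS =====

-- proof-side helpers: the three loop bodies and the v-sequence
def pvH1 (v : Int) : Int := PySem.Int.mod (24301 * v + 1) 256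

def pvH2 (st : Int × Int) : Int × Int :=
  let v := PySem.Int.mod ((st.2 - 1) * powNegOneMod 24301 256) 256
  (unshuffle (unshift st.1 v 256) 1 8, v)

def pvH3 (p : List Int × Int) : List Int × Int :=
  (p.1 ++ [p.2], PySem.Int.mod (24301 * p.2 + 1) 256)

def pvStepB (u : Int) (v : Int) : Int :=
  let u := PySem.Int.mod (u - v) 256
  PySem.Int.bor (u >>> 1) (PySem.Int.band u 1 <<< 7)

def pvV (b : Int) : Nat → Int
  | 0 => b % 256
  | j + 1 => (24301 * pvV b j + 1) % 256

lemma pv256 : (0 : Int) < 256 := by norm_num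

lemma pvMod256 (a : Int) : PySem.Int.mod a 256 = a % 256 := PySem.Int.mod_eq_emod_of_pos pv256

lemma pvFoldlConst {α : Type} (h : α → α) : ∀ (l : List Int) (init : α),
    l.foldl (fun s _ => h s) init = h^[l.length] init := by
  intro l
  induction l with
  | nil => intro init; rfl
  | cons x xs ih => intro init; simpa [Function.iterate_succ_apply] using ih (h init)

lemma pvRangeNil (r : Int) (h : r ≤ 0) : PySem.List.pyRange 0 r 1 = [] := by
  simp [PySem.List.pyRange]; omega

lemma pvFinv : powNegOneMod 24301 256 = 229 := by decide

lemma pvV_bounds (b : Int) (j : Nat) : 0 ≤ pvV b j ∧ pvV b j < 256 := by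
  cases j with
  | zero => exact ⟨Int.emod_nonneg b (by norm_num), Int.emod_lt_of_pos b pv256⟩
  | succ j => exact ⟨Int.emod_nonneg _ (by norm_num), Int.emod_lt_of_pos _ pv256⟩

lemma pvV_inv (b : Int) (j : Nat) : ((pvV b (j + 1) - 1) * 229) % 256 = pvV b j := by
  obtain ⟨h0, h1⟩ := pvV_bounds b j
  set y := pvV b j with hy
  have hdef : pvV b (j + 1) = (24301 * y + 1) % 256 := rfl
  set q := (24301 * y + 1) / 256 with hq
  have hr : (24301 * y + 1) % 256 = 24301 * y + 1 - 256 * q := by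
    rw [hq, Int.emod_def]
  have harg : ((24301 * y + 1) % 256 - 1) * 229 = y + 256 * (21738 * y - 229 * q) := by
    rw [hr]; ring
  rw [hdef, harg, Int.add_mul_emod_self_left, Int.emod_eq_of_lt h0 h1]

-- the rotate-right step of A equals the rotate-right step of B (checked on all 256 residues)
set_option maxRecDepth 8192 in
lemma pvStep256 : ∀ m : Fin 256,
    unshuffle ((m : Nat) : Int) 1 8 =
      PySem.Int.bor (((m : Nat) : Int) >>> 1) (PySem.Int.band ((m : Nat) : Int) 1 <<< 7) := by
  decide

lemma pvStepEq (u v : Int) : unshuffle (unshift u v 256) 1 8 = pvStepB u v := by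
  have hw : unshift u v 256 = (u - v) % 256 := by
    simp only [unshift, pvMod256, Int.add_emod_right]
  have h0 : 0 ≤ (u - v) % 256 := Int.emod_nonneg _ (by norm_num)
  have h1 : (u - v) % 256 < 256 := Int.emod_lt_of_pos _ pv256
  have hm : (((u - v) % 256).toNat : Int) = (u - v) % 256 := Int.toNat_of_nonneg h0
  have := pvStep256 ⟨((u - v) % 256).toNat, by omega⟩
  simp only [hm] at this
  simp only [pvStepB, pvMod256, hw, this]

lemma pvIter1 (b : Int) : ∀ m : Nat, pvH1^[m + 1] b = pvV b (m + 1) := by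
  intro m
  induction m with
  | zero =>
      show pvH1 b = pvV b 1
      simp only [pvH1, pvMod256, pvV]
      have h : (24301 * (b % 256)) % 256 = (24301 * b) % 256 := by
        rw [Int.mul_emod, Int.emod_emod_of_dvd _ dvd_rfl, ← Int.mul_emod]
      conv_rhs => rw [Int.add_emod, h, ← Int.add_emod]
  | succ m ih =>
      rw [Function.iterate_succ_apply', ih]
      show PySem.Int.mod (24301 * pvV b (m + 1) + 1) 256 = pvV b (m + 2)
      rw [pvMod256]; rfl

lemma pvIter3 (b : Int) : ∀ m : Nat,
    pvH3^[m] ([], PySem.Int.mod b 256) = ((List.range m).map (pvV b), pvV b m) := by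
  intro m
  induction m with
  | zero => rw [Function.iterate_zero_apply, pvMod256]; rfl
  | succ m ih =>
      rw [Function.iterate_succ_apply', ih]
      simp only [pvH3, List.range_succ, List.map_append, List.map]
      exact congrArg _ (by rw [pvMod256]; rfl)

lemma pvLoopEq (b : Int) : ∀ (m : Nat) (u : Int),
    (pvH2^[m] (u, pvV b m)).1 = ((List.range m).map (pvV b)).reverse.foldl pvStepB u := by
  intro m
  induction m with
  | zero => intro u; rfl
  | succ m ih =>
      intro u
      have hv : PySem.Int.mod ((pvV b (m + 1) - 1) * powNegOneMod 24301 256) 256 = pvV b m := by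
        rw [pvFinv, pvMod256, pvV_inv]
      rw [Function.iterate_succ_apply]
      have h2 : pvH2 (u, pvV b (m + 1)) = (pvStepB u (pvV b m), pvV b m) := by
        simp only [pvH2, hv, pvStepEq]
      rw [h2, ih]
      simp [List.range_succ]

lemma pvPortA (u b : Int) (m : Nat) :
    unshuffle_shifter u b (↑m) = (pvH2^[m] (u, pvH1^[m] b)).1 := by
  simp only [unshuffle_shifter, PySem.List.pyRange_zero_natCast]
  rw [pvFoldlConst, pvFoldlConst]
  simp only [List.length_map, List.length_range]
  rfl

lemma pvPortB (u b : Int) (m : Nat) :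
    unshuffle_shifter_alt u b (↑m) =
      ((pvH3^[m] ([], PySem.Int.mod b 256)).1).reverse.foldl pvStepB u := by
  have hmax : max ((m : Int)) 0 = (m : Int) := by omega
  simp only [unshuffle_shifter_alt, hmax, PySem.List.pyRange_zero_natCast]
  rw [pvFoldlConst]
  simp only [List.length_map, List.length_range]
  rfl

-- ===== VERDICT (by name: the statement is the Claim_ definition above) =====
theorem unshuffle_shifter_spec : Claim_equal_unshuffle_shifter := by
  intro u b r _
  unfold Spec_unshuffle_shifter
  by_cases hr : r ≤ 0
  · have h1 : PySem.List.pyRange 0 r 1 = [] := pvRangeNil r hr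
    have hmax : max r 0 = 0 := by omega
    have h2 : PySem.List.pyRange 0 (max r 0) 1 = [] := by rw [hmax]; exact pvRangeNil 0 le_rfl
    simp [unshuffle_shifter, unshuffle_shifter_alt, h1, h2]
  · push Not at hr
    obtain ⟨m, rfl⟩ : ∃ m : Nat, r = ((m : Nat) : Int) :=
      ⟨r.toNat, (Int.toNat_of_nonneg hr.le).symm⟩
    obtain ⟨k, rfl⟩ : ∃ k : Nat, m = k + 1 := by
      cases m with
      | zero => omega
      | succ k => exact ⟨k, rfl⟩
    rw [pvPortA, pvPortB, pvIter1, pvIter3, pvLoopEq]
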